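-- pv_equiv track=rewrite | github.com/JamesCerar/aoc2021 | 12/12b.py | countPrevs
-- ===== SOURCE A (Python) =====
-- from collections import defaultdict
--
-- def countPrevs(curPath):
--     prevDict = defaultdict(int)
--     for i in curPath:
--         if i.islower():
--             prevDict[i] += 1
--             if prevDict[i] > 1:
--                 return False
--
--     return True
-- ===== SOURCE B (Python) =====
-- def countPrevs(curPath):
--     lowers = [i for i in curPath if i.islower()]
--     return len(lowers) == len(set(lowers))
-- ===== Notes on version B (the rewrite author's own statement) =====
-- stated objective: simpler
-- what changed: Replaces the incremental defaultdict counter with per-element early exit by a one-shot comprehension of the lowercase elements and a length-vs-set-cardinality comparison.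
import Mathlib
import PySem

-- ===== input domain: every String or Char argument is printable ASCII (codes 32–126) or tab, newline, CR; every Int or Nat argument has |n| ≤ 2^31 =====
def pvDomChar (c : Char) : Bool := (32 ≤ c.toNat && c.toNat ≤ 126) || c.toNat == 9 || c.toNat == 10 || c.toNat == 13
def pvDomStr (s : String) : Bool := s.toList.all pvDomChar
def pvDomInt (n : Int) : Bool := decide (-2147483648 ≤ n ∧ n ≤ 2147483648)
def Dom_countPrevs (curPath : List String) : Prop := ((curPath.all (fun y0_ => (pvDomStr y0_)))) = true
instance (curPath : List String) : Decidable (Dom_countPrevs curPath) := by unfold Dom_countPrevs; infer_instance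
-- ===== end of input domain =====

-- B replaces A's incremental counter-with-early-exit by filtering the lowercase elements once
-- and comparing the list's length with its set's cardinality (objective: simpler).

-- str.islower(), ported by hand (PySem has only the Char predicates): at least one cased char
-- and no uppercase char — exact on the ASCII domain, where the cased chars are the letters.
def pyStrIslower (s : String) : Bool :=
  s.toList.any PySem.Chars.islower && s.toList.all (fun c => !PySem.Chars.isupper c)

-- ===== PORT A =====
def countPrevsGo : List String → PySem.Dict String Int → Bool
  | [], _ => true
  | i :: rest, d =>
    if pyStrIslower i then
      let d' := d.modify i 0 (· + 1)      -- prevDict[i] += 1 (defaultdict(int))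
      if d'.getD i 0 > 1 then false
      else countPrevsGo rest d'
    else countPrevsGo rest d

def countPrevs (curPath : List String) : Bool :=
  countPrevsGo curPath PySem.Dict.empty

-- ===== PORT B =====
def countPrevs_alt (curPath : List String) : Bool :=
  let lowers := curPath.filter pyStrIslower
  lowers.length == (PySem.Set.ofList lowers).length

-- ===== PRECONDITION & SPEC =====
def Spec_countPrevs (curPath : List String) (out : Bool) : Prop := out = countPrevs_alt curPath
instance (curPath : List String) (out : Bool) : Decidable (Spec_countPrevs curPath out) := by unfold Spec_countPrevs; infer_instance

-- ===== CLAIM (what is proved, stated in full; the proofs are below) =====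
def Claim_equal_countPrevs : Prop := ∀ (curPath : List String), Dom_countPrevs curPath → Spec_countPrevs curPath (countPrevs curPath)

-- ===== LEMMAS AND PROOFS =====

-- A's loop, characterised: true iff every lowercase element's starting count plus its
-- number of occurrences stays ≤ 1.
theorem countPrevsGo_eq (l : List String) (d : PySem.Dict String Int) :
    countPrevsGo l d
      = decide (∀ x ∈ l.filter pyStrIslower,
          d.getD x 0 + ((l.filter pyStrIslower).count x : Int) ≤ 1) := by
  induction l generalizing d with
  | nil => simp [countPrevsGo]
  | cons i rest ih =>
    by_cases hp : pyStrIslower i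
    · simp only [countPrevsGo, hp, if_pos]
      rw [PySem.Dict.getD_modify_self]
      by_cases hgt : d.getD i 0 + 1 > 1
      · rw [if_pos hgt]
        symm
        simp only [decide_eq_false_iff_not, not_forall]
        refine ⟨i, by simp [hp], ?_⟩
        simp only [List.filter_cons, hp, if_pos, List.count_cons_self]
        push_cast
        omega
      · rw [if_neg hgt, ih]
        apply decide_eq_decide.mpr
        constructor
        · intro h x hx
          simp only [List.filter_cons, hp, if_pos, List.mem_cons] at hx ⊢
          rcases hx with rfl | hx
          · by_cases hmem : x ∈ rest.filter pyStrIslower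
            · have := h x hmem
              rw [PySem.Dict.getD_modify_self] at this
              simp only [List.count_cons_self]
              push_cast
              omega
            · simp only [List.count_cons_self]
              rw [List.count_eq_zero_of_not_mem hmem]
              push_cast
              omega
          · have := h x hx
            by_cases hxi : x = i
            · subst hxi
              rw [PySem.Dict.getD_modify_self] at this
              simp only [List.count_cons_self]
              push_cast at this ⊢
              omega
            · rw [PySem.Dict.getD_modify_of_ne _ _ _ hxi] at this
              rw [List.count_cons_of_ne (Ne.symm hxi)]
              exact this
        · intro h x hx
          by_cases hxi : x = i
          · subst hxi
            rw [PySem.Dict.getD_modify_self]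
            have := h x (by simp [hp])
            simp only [List.filter_cons, hp, if_pos, List.count_cons_self] at this
            push_cast at this ⊢
            omega
          · rw [PySem.Dict.getD_modify_of_ne _ _ _ hxi]
            have := h x (by simp only [List.filter_cons, hp, if_pos, List.mem_cons]; right; exact hx)
            simp only [List.filter_cons, hp, if_pos, List.count_cons_of_ne (Ne.symm hxi)] at this
            exact this
    · simp only [countPrevsGo, hp, Bool.false_eq_true, ih]
      simp only [List.filter_cons, hp]
      simp

theorem foldl_add_len_le (l : List String) (s : PySem.Set String) :
    (l.foldl PySem.Set.add s).length ≤ s.length + l.length := by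
  induction l generalizing s with
  | nil => simp
  | cons a l ih =>
    simp only [List.foldl_cons, List.length_cons]
    have h1 : (s.add a).length ≤ s.length + 1 := by
      unfold PySem.Set.add; split <;> simp
    have := ih (s.add a)
    omega

theorem foldl_add_len_eq_iff (l : List String) (s : PySem.Set String) :
    (l.foldl PySem.Set.add s).length = s.length + l.length ↔ l.Nodup ∧ ∀ x ∈ l, x ∉ s := by
  induction l generalizing s with
  | nil => simp
  | cons a l ih =>
    simp only [List.foldl_cons, List.length_cons, List.nodup_cons, List.mem_cons]
    by_cases hc : a ∈ s
    · have hadd : s.add a = s := by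
        unfold PySem.Set.add
        rw [if_pos (by simpa [PySem.Set.contains] using hc)]
      rw [hadd]
      have := foldl_add_len_le l s
      constructor
      · intro h; omega
      · rintro ⟨_, hall⟩
        exact absurd hc (hall a (Or.inl rfl))
    · have hadd : s.add a = s ++ [a] := by
        unfold PySem.Set.add
        rw [if_neg (by simpa [PySem.Set.contains] using hc)]
      rw [hadd]
      have hi := ih (s ++ [a])
      simp only [List.length_append, List.length_singleton] at hi
      rw [show List.length s + (l.length + 1) = s.length + 1 + l.length from by omega, hi]
      simp only [List.mem_append, List.mem_singleton]
      constructor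
      · rintro ⟨hnd, hall⟩
        refine ⟨⟨fun hal => (hall a hal) (Or.inr rfl), hnd⟩, fun x hx => ?_⟩
        rcases hx with rfl | hx
        · exact hc
        · exact fun hxs => (hall x hx) (Or.inl hxs)
      · rintro ⟨⟨hal, hnd⟩, hall⟩
        refine ⟨hnd, fun x hx => ?_⟩
        rintro (hxs | rfl)
        · exact (hall x (Or.inr hx)) hxs
        · exact hal hx

-- set(l) has as many elements as l iff l has no duplicates.
theorem ofList_length_eq_iff (l : List String) :
    (PySem.Set.ofList l).length = l.length ↔ l.Nodup := by
  have := foldl_add_len_eq_iff l PySem.Set.empty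
  simp only [PySem.Set.empty, List.length_nil, zero_add, List.not_mem_nil, not_false_iff] at this
  simpa [PySem.Set.ofList] using this

-- ===== VERDICT (by name: the statement is the Claim_ definition above) =====
theorem countPrevs_spec : Claim_equal_countPrevs := by
  intro curPath _
  unfold Spec_countPrevs countPrevs countPrevs_alt
  rw [countPrevsGo_eq]
  simp only [PySem.Dict.getD_empty, zero_add]
  have hiff :
      (∀ x ∈ curPath.filter pyStrIslower,
        ((curPath.filter pyStrIslower).count x : Int) ≤ 1)
      ↔ (curPath.filter pyStrIslower).length
          = (PySem.Set.ofList (curPath.filter pyStrIslower)).length := by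
    rw [Eq.comm, ofList_length_eq_iff, List.nodup_iff_count_le_one]
    constructor
    · intro h a
      by_cases ha : a ∈ curPath.filter pyStrIslower
      · exact_mod_cast h a ha
      · rw [List.count_eq_zero_of_not_mem ha]; omega
    · intro h x _
      exact_mod_cast h x
  rw [decide_eq_decide.mpr hiff]
  exact Eq.symm (Bool.beq_eq_decide_eq _ _)
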